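-- pv_equiv track=rewrite | github.com/tangzhilinnz/SparseAttention | Hierarchical_attention_V2.py | build_level_info
-- ===== SOURCE A (Python) =====
-- def build_level_info(N):
--     sizes = []
--     curr = N
--     while curr > 1:
--         sizes.append(curr // 2)
--         curr = curr // 2
--     offsets = [0]
--     for s in sizes[:-1]:
--         offsets.append(offsets[-1] + s)
--     return sizes, offsets
-- ===== SOURCE B (Python) =====
-- def build_level_info(N):
--     # Recursive decomposition: carry the running offset down the recursion,
--     # building sizes and offsets together in one pass.
--     def go(curr, off):
--         if curr <= 1:
--             return [], []
--         s = curr // 2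
--         ts, tofs = go(s, off + s)
--         return [s] + ts, [off] + tofs
--     sizes, offsets = go(N, 0)
--     return sizes, offsets if offsets else [0]
-- ===== Notes on version B (the rewrite author's own statement) =====
-- stated objective: alternative
-- what changed: A's two sequential loops (a while-loop collecting halving sizes, then a rescan of sizes building prefix-sum offsets via offsets[-1]) are replaced by a single recursion that carries the running offset downward and builds both lists together in one pass.
import Mathlib
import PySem

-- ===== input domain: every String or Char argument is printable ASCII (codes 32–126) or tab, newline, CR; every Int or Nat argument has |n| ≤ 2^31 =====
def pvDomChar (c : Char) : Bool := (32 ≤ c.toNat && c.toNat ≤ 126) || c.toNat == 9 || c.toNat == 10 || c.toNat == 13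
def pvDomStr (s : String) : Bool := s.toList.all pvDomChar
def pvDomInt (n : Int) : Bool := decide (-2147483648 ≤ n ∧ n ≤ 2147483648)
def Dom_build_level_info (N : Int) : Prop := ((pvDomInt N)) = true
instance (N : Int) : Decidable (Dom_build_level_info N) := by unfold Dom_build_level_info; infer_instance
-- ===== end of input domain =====

-- B replaces A's two sequential loops (halving loop, then a rescan building prefix
-- offsets) with a single recursion that carries the running offset down; objective: alternative decomposition.

-- ===== PORT A =====
-- while curr > 1: sizes.append(curr // 2); curr = curr // 2
def pvSizesLoop (curr : Int) : List Int :=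
  if curr > 1 then
    PySem.Int.floordiv curr 2 :: pvSizesLoop (PySem.Int.floordiv curr 2)
  else []
termination_by curr.toNat
decreasing_by
  rw [PySem.Int.floordiv_eq_ediv_of_pos (by omega : (0:Int) < 2)]
  omega

def build_level_info (N : Int) : List Int × List Int :=
  let sizes := pvSizesLoop N
  -- offsets = [0]; for s in sizes[:-1]: offsets.append(offsets[-1] + s)
  let offsets := List.foldl (fun o s => o ++ [o.getLastD 0 + s]) [0]
    (PySem.List.slice sizes none (some (-1)))
  (sizes, offsets)

-- ===== PORT B =====
def pvGo (curr off : Int) : List Int × List Int :=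
  if curr ≤ 1 then ([], [])
  else
    let s := PySem.Int.floordiv curr 2
    let p := pvGo s (off + s)
    (s :: p.1, off :: p.2)
termination_by curr.toNat
decreasing_by
  rw [PySem.Int.floordiv_eq_ediv_of_pos (by omega : (0:Int) < 2)]
  omega

def build_level_info_alt (N : Int) : List Int × List Int :=
  let p := pvGo N 0
  (p.1, if p.2 = [] then [0] else p.2)

-- ===== PRECONDITION & SPEC =====
def Spec_build_level_info (N : Int) (out : List Int × List Int) : Prop := out = build_level_info_alt N
instance (N : Int) (out : List Int × List Int) : Decidable (Spec_build_level_info N out) := by unfold Spec_build_level_info; infer_instance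

-- ===== CLAIM (what is proved, stated in full; the proofs are below) =====
def Claim_equal_build_level_info : Prop := ∀ (N : Int), Dom_build_level_info N → Spec_build_level_info N (build_level_info N)

-- ===== LEMMAS AND PROOFS =====

/-- Offsets as B produces them: `scan off l = [off, off+l₀, off+l₀+l₁, …]`, length `l.length`. -/
def pvScan (off : Int) : List Int → List Int
  | [] => []
  | s :: ts => off :: pvScan (off + s) ts

/-- Running sums after `e`: the tail of a scan. -/
def pvScanTail (e : Int) : List Int → List Int
  | [] => []
  | s :: ts => (e + s) :: pvScanTail (e + s) ts

lemma pvGo_eq (curr off : Int) :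
    pvGo curr off = (pvSizesLoop curr, pvScan off (pvSizesLoop curr)) := by
  rw [pvGo, pvSizesLoop]
  by_cases h : curr > 1
  · have hne : ¬ curr ≤ 1 := by omega
    simp only [if_neg hne, if_pos h]
    rw [pvGo_eq (PySem.Int.floordiv curr 2) (off + PySem.Int.floordiv curr 2)]
    simp [pvScan]
  · simp [if_pos (by omega : curr ≤ 1), if_neg h, pvScan]
termination_by curr.toNat
decreasing_by
  rw [PySem.Int.floordiv_eq_ediv_of_pos (by omega : (0:Int) < 2)]
  omega

lemma pvFoldl_step (l pre : List Int) (e : Int) :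
    List.foldl (fun o s => o ++ [o.getLastD 0 + s]) (pre ++ [e]) l
      = pre ++ e :: pvScanTail e l := by
  induction l generalizing pre e with
  | nil => simp [pvScanTail]
  | cons s ts ih =>
    simp only [List.foldl_cons, List.getLastD_concat]
    rw [show (pre ++ [e]) ++ [e + s] = (pre ++ [e]) ++ [e + s] from rfl, ih (pre ++ [e]) (e + s)]
    simp [pvScanTail]

lemma pvScan_eq_cons_scanTail (l : List Int) (e : Int) (h : l ≠ []) :
    pvScan e l = e :: pvScanTail e l.dropLast := by
  induction l generalizing e with
  | nil => exact absurd rfl h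
  | cons s ts ih =>
    cases ts with
    | nil => simp [pvScan, pvScanTail]
    | cons t ts' =>
      rw [pvScan, ih (e + s) (by simp)]
      simp [pvScanTail]

-- ===== VERDICT (by name: the statement is the Claim_ definition above) =====
theorem build_level_info_spec : Claim_equal_build_level_info := by
  intro N _
  unfold Spec_build_level_info build_level_info build_level_info_alt
  rw [pvGo_eq N 0]
  simp only [PySem.List.slice_to_neg_one]
  by_cases h : pvSizesLoop N = []
  · simp [h, pvScan]
  · have hfold := pvFoldl_step (pvSizesLoop N).dropLast [] 0
    simp only [List.nil_append] at hfold
    rw [hfold, pvScan_eq_cons_scanTail _ 0 h]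
    simp
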